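-- pv_equiv track=rewrite | github.com/angelinn/HackBulgaria | part0/biggest_difference.py | biggest_difference
-- ===== SOURCE A (Python) =====
-- def biggest_difference(arr):
--     difference = arr[0] - arr[1]
--     length = len(arr)
--
--     for i in range(length):
--         for j in range(i + 1, length):
--             if abs(arr[i] - arr[j]) > abs(difference):
--                 difference = arr[i] - arr[j]
--
--             j += 1
--         i += 1
--
--     return difference
-- ===== SOURCE B (Python) =====
-- def biggest_difference(arr):
--     lo = hi = arr[0]
--     ilo = ihi = 0
--     for k, v in enumerate(arr):
--         if v < lo:
--             lo, ilo = v, k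
--         if v > hi:
--             hi, ihi = v, k
--     return hi - lo if ihi < ilo else lo - hi
-- ===== Notes on version B (the rewrite author's own statement) =====
-- stated objective: faster
-- what changed: replaces the O(n^2) all-pairs scan with one pass tracking min, max and their first indices; the answer is max-min signed by which extreme occurs first
import Mathlib
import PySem

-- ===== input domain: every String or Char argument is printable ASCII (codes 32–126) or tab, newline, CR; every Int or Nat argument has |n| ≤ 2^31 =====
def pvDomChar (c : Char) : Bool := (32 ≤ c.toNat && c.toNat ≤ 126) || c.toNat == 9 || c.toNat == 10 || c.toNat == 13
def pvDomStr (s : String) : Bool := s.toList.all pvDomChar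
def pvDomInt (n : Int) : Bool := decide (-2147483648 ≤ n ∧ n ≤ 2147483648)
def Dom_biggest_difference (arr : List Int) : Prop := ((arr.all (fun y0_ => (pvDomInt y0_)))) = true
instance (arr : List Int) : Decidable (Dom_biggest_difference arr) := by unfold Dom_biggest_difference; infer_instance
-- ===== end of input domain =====

-- B replaces A's O(n^2) all-pairs scan by one pass tracking min, max and their first indices (measured asymptotically faster).


-- ===== PORT A =====
def biggest_difference (arr : List Int) : Int :=
  let difference := PySem.List.pyGetD arr 0 0 - PySem.List.pyGetD arr 1 0
  let length : Int := arr.length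
  (PySem.List.pyRange 0 length 1).foldl (fun diff i =>
    (PySem.List.pyRange (i + 1) length 1).foldl (fun diff j =>
      if |PySem.List.pyGetD arr i 0 - PySem.List.pyGetD arr j 0| > |diff|
      then PySem.List.pyGetD arr i 0 - PySem.List.pyGetD arr j 0
      else diff) diff) difference

-- ===== PORT B =====
-- one loop step: update (lo, ilo, hi, ihi) with the pair (index, value)
def bdStep (st : Int × Int × Int × Int) (kv : Int × Int) : Int × Int × Int × Int :=
  let l := if kv.2 < st.1 then (kv.2, kv.1) else (st.1, st.2.1)
  let h := if st.2.2.1 < kv.2 then (kv.2, kv.1) else (st.2.2.1, st.2.2.2)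
  (l.1, l.2, h.1, h.2)

def biggest_difference_alt (arr : List Int) : Int :=
  let a0 := PySem.List.pyGetD arr 0 0
  let s := (PySem.List.enumerate arr 0).foldl bdStep (a0, 0, a0, 0)
  if s.2.2.2 < s.2.1 then s.2.2.1 - s.1 else s.1 - s.2.2.1

-- ===== PRECONDITION & SPEC =====
-- A reads the first two elements up front: it raises IndexError when the list has fewer than two.
def Pre_biggest_difference (arr : List Int) : Prop := 2 ≤ arr.length
instance (arr : List Int) : Decidable (Pre_biggest_difference arr) := by
  unfold Pre_biggest_difference; infer_instance

def pvWitness_biggest_difference : List Int := [3, 1, 4]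

def Spec_biggest_difference (arr : List Int) (out : Int) : Prop := out = biggest_difference_alt arr
instance (arr : List Int) (out : Int) : Decidable (Spec_biggest_difference arr out) := by
  unfold Spec_biggest_difference; infer_instance

-- ===== CLAIM (what is proved, stated in full; the proofs are below) =====
def Claim_equal_biggest_difference : Prop := ∀ (arr : List Int), Dom_biggest_difference arr → Pre_biggest_difference arr → Spec_biggest_difference arr (biggest_difference arr)

-- ===== LEMMAS AND PROOFS =====

-- shorthand: arr[i] with default 0 (all uses are in range)
def geti (arr : List Int) (i : Int) : Int := PySem.List.pyGetD arr i 0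

-- "keep the first strictly-larger-in-absolute-value element" fold of A
def sel (d : Int) (xs : List Int) : Int :=
  xs.foldl (fun d x => if |x| > |d| then x else d) d

theorem sel_cons (d x : Int) (xs : List Int) :
    sel d (x :: xs) = sel (if |x| > |d| then x else d) xs := rfl

theorem sel_append (d : Int) (xs ys : List Int) :
    sel d (xs ++ ys) = sel (sel d xs) ys := List.foldl_append

theorem sel_eq_self (d : Int) (xs : List Int) (h : ∀ x ∈ xs, |x| ≤ |d|) :
    sel d xs = d := by
  induction xs with
  | nil => rfl
  | cons x xs ih =>
      rw [sel_cons, if_neg (by simpa using not_lt.mpr (h x (by simp)))]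
      exact ih (fun y hy => h y (by simp [hy]))

theorem sel_abs_lt (d : Int) (xs : List Int) (M : Int) (hd : |d| < M)
    (h : ∀ x ∈ xs, |x| < M) : |sel d xs| < M := by
  induction xs generalizing d with
  | nil => simpa using hd
  | cons x xs ih =>
      rw [sel_cons]
      exact ih _ (by split_ifs <;> [exact h x (by simp); exact hd])
        (fun y hy => h y (by simp [hy]))

theorem sel_first (d m : Int) (as bs : List Int) (hd : |d| < |m|)
    (ha : ∀ a ∈ as, |a| < |m|) (hb : ∀ b ∈ bs, |b| ≤ |m|) :
    sel d (as ++ m :: bs) = m := by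
  rw [sel_append, sel_cons, if_pos (sel_abs_lt d as |m| hd ha)]
  exact sel_eq_self m bs hb

-- the nested foldl of A is `sel` over the concatenation of the inner value lists
theorem foldl_sel_flatMap (g : Int → List Int) (l : List Int) (d : Int) :
    l.foldl (fun d i => sel d (g i)) d = sel d (l.flatMap g) := by
  induction l generalizing d with
  | nil => rfl
  | cons a l ih => rw [List.foldl_cons, List.flatMap_cons, sel_append, ih]

-- A as `sel` over all pair differences
def pairVals (arr : List Int) : List Int :=
  (PySem.List.pyRange 0 (arr.length : Int) 1).flatMap (fun i =>
    (PySem.List.pyRange (i + 1) (arr.length : Int) 1).map (fun j => geti arr i - geti arr j))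

theorem biggest_difference_eq_sel (arr : List Int) :
    biggest_difference arr = sel (geti arr 0 - geti arr 1) (pairVals arr) := by
  unfold biggest_difference pairVals geti
  rw [← foldl_sel_flatMap]
  refine PySem.List.foldl_congr_mem _ _ _ _ ?_
  intro acc i _
  rw [sel, List.foldl_map]

-- lo is the value of the first minimum of arr, at Int index ilo (and dually for hi)
def IsFirstMin (arr : List Int) (lo ilo : Int) : Prop :=
  0 ≤ ilo ∧ ilo < arr.length ∧ geti arr ilo = lo ∧
  (∀ k : Int, 0 ≤ k → k < arr.length → lo ≤ geti arr k) ∧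
  (∀ k : Int, 0 ≤ k → k < ilo → lo < geti arr k)

def IsFirstMax (arr : List Int) (hi ihi : Int) : Prop :=
  0 ≤ ihi ∧ ihi < arr.length ∧ geti arr ihi = hi ∧
  (∀ k : Int, 0 ≤ k → k < arr.length → geti arr k ≤ hi) ∧
  (∀ k : Int, 0 ≤ k → k < ihi → geti arr k < hi)

theorem geti_append_left (pre xs : List Int) (k : Int) (h0 : 0 ≤ k) (h : k < pre.length) :
    geti (pre ++ xs) k = geti pre k := by
  unfold geti
  rw [PySem.List.pyGetD_eq_getElem _ 0 h0 (by simp; omega),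
      PySem.List.pyGetD_eq_getElem _ 0 h0 (by exact_mod_cast h),
      List.getElem_append_left]

theorem geti_append_self (pre xs : List Int) (x : Int) :
    geti (pre ++ x :: xs) (pre.length : Int) = x := by
  unfold geti
  rw [PySem.List.pyGetD_eq_getElem _ 0 (by exact_mod_cast Nat.zero_le _) (by simp)]
  simp

-- B's fold maintains first-min / first-max of the prefix consumed so far
theorem bdStep_min (pre : List Int) (x lo ilo hi ihi : Int) (hmin : IsFirstMin pre lo ilo) :
    IsFirstMin (pre ++ [x])
      (bdStep (lo, ilo, hi, ihi) ((pre.length : Int), x)).1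
      (bdStep (lo, ilo, hi, ihi) ((pre.length : Int), x)).2.1 := by
  obtain ⟨h0, h1, h2, h3, h4⟩ := hmin
  have hlen : ((pre ++ [x]).length : Int) = (pre.length : Int) + 1 := by simp
  by_cases hx : x < lo <;> simp only [bdStep, hx, if_true, if_false]
  · refine ⟨by positivity, by omega, geti_append_self pre [] x, ?_, ?_⟩
    · intro k hk0 hkn
      rcases (show k < (pre.length : Int) ∨ k = (pre.length : Int) by omega) with h | h
      · rw [geti_append_left pre [x] k hk0 h]
        have := h3 k hk0 h; omega
      · rw [h, geti_append_self pre [] x]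
    · intro k hk0 hkl
      rw [geti_append_left pre [x] k hk0 hkl]
      have := h3 k hk0 (by omega); omega
  · refine ⟨h0, by omega, ?_, ?_, ?_⟩
    · rw [geti_append_left pre [x] ilo h0 h1]; exact h2
    · intro k hk0 hkn
      rcases (show k < (pre.length : Int) ∨ k = (pre.length : Int) by omega) with h | h
      · rw [geti_append_left pre [x] k hk0 h]
        exact h3 k hk0 h
      · rw [h, geti_append_self pre [] x]; omega
    · intro k hk0 hkl
      rw [geti_append_left pre [x] k hk0 (by omega)]
      exact h4 k hk0 hkl

theorem bdStep_max (pre : List Int) (x lo ilo hi ihi : Int) (hmax : IsFirstMax pre hi ihi) :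
    IsFirstMax (pre ++ [x])
      (bdStep (lo, ilo, hi, ihi) ((pre.length : Int), x)).2.2.1
      (bdStep (lo, ilo, hi, ihi) ((pre.length : Int), x)).2.2.2 := by
  obtain ⟨h0, h1, h2, h3, h4⟩ := hmax
  have hlen : ((pre ++ [x]).length : Int) = (pre.length : Int) + 1 := by simp
  by_cases hx : hi < x <;> simp only [bdStep, hx, if_true, if_false]
  · refine ⟨by positivity, by omega, geti_append_self pre [] x, ?_, ?_⟩
    · intro k hk0 hkn
      rcases (show k < (pre.length : Int) ∨ k = (pre.length : Int) by omega) with h | h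
      · rw [geti_append_left pre [x] k hk0 h]
        have := h3 k hk0 h; omega
      · rw [h, geti_append_self pre [] x]
    · intro k hk0 hkl
      rw [geti_append_left pre [x] k hk0 hkl]
      have := h3 k hk0 (by omega); omega
  · refine ⟨h0, by omega, ?_, ?_, ?_⟩
    · rw [geti_append_left pre [x] ihi h0 h1]; exact h2
    · intro k hk0 hkn
      rcases (show k < (pre.length : Int) ∨ k = (pre.length : Int) by omega) with h | h
      · rw [geti_append_left pre [x] k hk0 h]
        exact h3 k hk0 h
      · rw [h, geti_append_self pre [] x]; omega
    · intro k hk0 hkl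
      rw [geti_append_left pre [x] k hk0 (by omega)]
      exact h4 k hk0 hkl

theorem foldB_inv (xs : List Int) : ∀ (pre : List Int) (lo ilo hi ihi : Int),
    IsFirstMin pre lo ilo → IsFirstMax pre hi ihi →
    (IsFirstMin (pre ++ xs)
        ((PySem.List.enumerate xs (pre.length : Int)).foldl bdStep (lo, ilo, hi, ihi)).1
        ((PySem.List.enumerate xs (pre.length : Int)).foldl bdStep (lo, ilo, hi, ihi)).2.1 ∧
     IsFirstMax (pre ++ xs)
        ((PySem.List.enumerate xs (pre.length : Int)).foldl bdStep (lo, ilo, hi, ihi)).2.2.1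
        ((PySem.List.enumerate xs (pre.length : Int)).foldl bdStep (lo, ilo, hi, ihi)).2.2.2) := by
  induction xs with
  | nil =>
      intro pre lo ilo hi ihi hmin hmax
      simpa [PySem.List.enumerate_nil] using ⟨hmin, hmax⟩
  | cons x xs ih =>
      intro pre lo ilo hi ihi hmin hmax
      rw [PySem.List.enumerate_cons, List.foldl_cons]
      have hmin' := bdStep_min pre x lo ilo hi ihi hmin
      have hmax' := bdStep_max pre x lo ilo hi ihi hmax
      have h := ih (pre ++ [x]) _ _ _ _ hmin' hmax'
      rw [List.append_cons]
      have hlen : ((pre ++ [x]).length : Int) = (pre.length : Int) + 1 := by simp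
      rw [hlen] at h
      simpa using h

-- any pair difference is bounded by hi - lo
theorem pair_bound (arr : List Int) (lo ilo hi ihi i j : Int)
    (hmin : IsFirstMin arr lo ilo) (hmax : IsFirstMax arr hi ihi)
    (h0 : 0 ≤ i) (hij : i < j) (hj : j < arr.length) :
    |geti arr i - geti arr j| ≤ hi - lo := by
  obtain ⟨-, -, -, hlo, -⟩ := hmin
  obtain ⟨-, -, -, hhi, -⟩ := hmax
  have := hlo i h0 (by omega); have := hlo j (by omega) hj
  have := hhi i h0 (by omega); have := hhi j (by omega) hj
  rw [abs_le]; omega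

-- a pair strictly lexicographically before (min ilo ihi, max ilo ihi) has |difference| < hi - lo
theorem pair_lt_of_lex_lt (arr : List Int) (lo ilo hi ihi i j : Int)
    (hmin : IsFirstMin arr lo ilo) (hmax : IsFirstMax arr hi ihi) (hne : lo < hi)
    (h0 : 0 ≤ i) (hij : i < j) (hj : j < arr.length)
    (hlex : i < min ilo ihi ∨ (i = min ilo ihi ∧ j < max ilo ihi)) :
    |geti arr i - geti arr j| < hi - lo := by
  by_contra hcon
  push Not at hcon
  have hb := pair_bound arr lo ilo hi ihi i j hmin hmax h0 hij hj
  have habs : |geti arr i - geti arr j| = hi - lo := le_antisymm hb hcon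
  obtain ⟨hl0, hln, hglo, hlobd, hlost⟩ := hmin
  obtain ⟨hh0, hhn, hghi, hhibd, hhist⟩ := hmax
  have hbi1 := hlobd i h0 (by omega)
  have hbi2 := hhibd i h0 (by omega)
  have hbj1 := hlobd j (by omega) hj
  have hbj2 := hhibd j (by omega) hj
  have hcases : (geti arr i = hi ∧ geti arr j = lo) ∨ (geti arr i = lo ∧ geti arr j = hi) := by
    rcases abs_cases (geti arr i - geti arr j) with ⟨he, -⟩ | ⟨he, -⟩ <;> rw [he] at habs
    · left; omega
    · right; omega
  have hfi_hi : ∀ k : Int, 0 ≤ k → geti arr k = hi → ihi ≤ k := by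
    intro k hk0 hk
    by_contra hlt; push Not at hlt
    have := hhist k hk0 hlt; omega
  have hfi_lo : ∀ k : Int, 0 ≤ k → geti arr k = lo → ilo ≤ k := by
    intro k hk0 hk
    by_contra hlt; push Not at hlt
    have := hlost k hk0 hlt; omega
  rcases hcases with ⟨hi1, hj1⟩ | ⟨hi1, hj1⟩
  · have h1 := hfi_hi i h0 hi1
    have h2 := hfi_lo j (by omega) hj1
    rcases hlex with h | ⟨he, hq⟩
    · omega
    · by_cases hm : ihi ≤ ilo
      · omega
      · have hie : i = ilo := by omega
        rw [hie, hglo] at hi1; omega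
  · have h1 := hfi_lo i h0 hi1
    have h2 := hfi_hi j (by omega) hj1
    rcases hlex with h | ⟨he, hq⟩
    · omega
    · by_cases hm : ilo ≤ ihi
      · omega
      · have hie : i = ihi := by omega
        rw [hie, hghi] at hi1; omega

theorem mem_pairVals (arr : List Int) (x : Int) (hx : x ∈ pairVals arr) :
    ∃ i j : Int, 0 ≤ i ∧ i < j ∧ j < (arr.length : Int) ∧ x = geti arr i - geti arr j := by
  simp only [pairVals, List.mem_flatMap, List.mem_map, PySem.List.mem_pyRange_one] at hx
  obtain ⟨i, ⟨hi0, hin⟩, j, ⟨hj1, hjn⟩, rfl⟩ := hx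
  exact ⟨i, j, hi0, by omega, hjn, rfl⟩

theorem biggest_difference_alt_eq (arr : List Int) (h2 : 2 ≤ arr.length) :
    ∃ lo ilo hi ihi, IsFirstMin arr lo ilo ∧ IsFirstMax arr hi ihi ∧
      biggest_difference_alt arr = if ihi < ilo then hi - lo else lo - hi := by
  obtain ⟨a, t, rfl⟩ : ∃ a t, arr = a :: t := by
    cases arr with
    | nil => simp at h2
    | cons a t => exact ⟨a, t, rfl⟩
  have hmin1 : IsFirstMin [a] a 0 := by
    refine ⟨le_refl 0, by simp, by simp [geti], ?_, ?_⟩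
    · intro k hk0 hkn
      have hk1 : k < 1 := by simpa using hkn
      have : k = 0 := by omega
      rw [this]; simp [geti]
    · intro k hk0 hkl; omega
  have hmax1 : IsFirstMax [a] a 0 := by
    refine ⟨le_refl 0, by simp, by simp [geti], ?_, ?_⟩
    · intro k hk0 hkn
      have hk1 : k < 1 := by simpa using hkn
      have : k = 0 := by omega
      rw [this]; simp [geti]
    · intro k hk0 hkl; omega
  have H := foldB_inv t [a] a 0 a 0 hmin1 hmax1
  have hlen1 : (([a] : List Int).length : Int) = 1 := by simp
  rw [hlen1] at H
  have harr : ([a] : List Int) ++ t = a :: t := rfl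
  rw [harr] at H
  refine ⟨_, _, _, _, H.1, H.2, ?_⟩
  have ha0 : PySem.List.pyGetD (a :: t) 0 0 = a := by simp [PySem.List.pyGetD_zero_cons]
  have hstep : bdStep (a, 0, a, 0) (0, a) = (a, 0, a, 0) := by simp [bdStep]
  simp only [biggest_difference_alt, ha0, PySem.List.enumerate_cons, List.foldl_cons, hstep,
    zero_add]

theorem sel_pairVals (arr : List Int) (lo ilo hi ihi : Int)
    (hmin : IsFirstMin arr lo ilo) (hmax : IsFirstMax arr hi ihi) (h2 : 2 ≤ arr.length) :
    sel (geti arr 0 - geti arr 1) (pairVals arr) = if ihi < ilo then hi - lo else lo - hi := by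
  have h2' : (1 : Int) < (arr.length : Int) := by exact_mod_cast h2
  obtain ⟨hl0, hln, hglo, hlobd, hlost⟩ := hmin
  obtain ⟨hh0, hhn, hghi, hhibd, hhist⟩ := hmax
  have hmin' : IsFirstMin arr lo ilo := ⟨hl0, hln, hglo, hlobd, hlost⟩
  have hmax' : IsFirstMax arr hi ihi := ⟨hh0, hhn, hghi, hhibd, hhist⟩
  have hball : ∀ i j : Int, 0 ≤ i → i < j → j < (arr.length : Int) →
      |geti arr i - geti arr j| ≤ hi - lo :=
    fun i j a b c => pair_bound arr lo ilo hi ihi i j hmin' hmax' a b c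
  have hlohi : lo ≤ hi := by
    have := hlobd 0 (le_refl 0) (by omega)
    have := hhibd 0 (le_refl 0) (by omega)
    omega
  by_cases hlh : hi ≤ lo
  · -- all elements equal: every pair difference is 0
    have hall : ∀ x ∈ pairVals arr, |x| ≤ |geti arr 0 - geti arr 1| := by
      intro x hx
      obtain ⟨i, j, hi0, hij, hjn, rfl⟩ := mem_pairVals arr x hx
      have h := hball i j hi0 hij hjn
      have := abs_nonneg (geti arr 0 - geti arr 1)
      omega
    rw [sel_eq_self _ _ hall]
    have hd0 := hball 0 1 (le_refl 0) (by omega) h2'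
    have := abs_nonneg (geti arr 0 - geti arr 1)
    have hz : geti arr 0 - geti arr 1 = 0 := by
      rcases abs_cases (geti arr 0 - geti arr 1) with ⟨he, -⟩ | ⟨he, -⟩ <;> omega
    rw [hz]; split_ifs <;> omega
  · push Not at hlh
    set p := min ilo ihi with hp
    set q := max ilo ihi with hq
    have hne : ilo ≠ ihi := by
      intro he; rw [he, hghi] at hglo; omega
    have hp0 : 0 ≤ p := by omega
    have hpq : p < q := by omega
    have hqn : q < (arr.length : Int) := by omega
    have hm_val : geti arr p - geti arr q = if ihi < ilo then hi - lo else lo - hi := by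
      by_cases hc : ihi < ilo
      · have hpe : p = ihi := by omega
        have hqe : q = ilo := by omega
        rw [if_pos hc, hpe, hqe, hglo, hghi]
      · have hpe : p = ilo := by omega
        have hqe : q = ihi := by omega
        rw [if_neg hc, hpe, hqe, hglo, hghi]
    have habs_m : |geti arr p - geti arr q| = hi - lo := by
      rw [hm_val]; split_ifs
      · exact abs_of_nonneg (by omega)
      · rw [abs_of_nonpos (by omega)]; ring
    have hsplit : pairVals arr =
        ((PySem.List.pyRange 0 p 1).flatMap (fun i =>
            (PySem.List.pyRange (i + 1) (arr.length : Int) 1).map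
              (fun j => geti arr i - geti arr j)) ++
         (PySem.List.pyRange (p + 1) q 1).map (fun j => geti arr p - geti arr j)) ++
        (geti arr p - geti arr q) ::
        ((PySem.List.pyRange (q + 1) (arr.length : Int) 1).map (fun j => geti arr p - geti arr j) ++
         (PySem.List.pyRange (p + 1) (arr.length : Int) 1).flatMap (fun i =>
            (PySem.List.pyRange (i + 1) (arr.length : Int) 1).map
              (fun j => geti arr i - geti arr j))) := by
      unfold pairVals
      rw [PySem.List.pyRange_one_append 0 p (arr.length : Int) (by omega) (by omega),
          List.flatMap_append,
          PySem.List.pyRange_one_cons (show p < (arr.length : Int) by omega),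
          List.flatMap_cons,
          PySem.List.pyRange_one_append (p + 1) q (arr.length : Int) (by omega) (by omega),
          List.map_append,
          PySem.List.pyRange_one_cons (show q < (arr.length : Int) by omega),
          List.map_cons]
      simp [List.append_assoc]
    rw [← hm_val, hsplit]
    have hb_bs : ∀ b ∈ (PySem.List.pyRange (q + 1) (arr.length : Int) 1).map
          (fun j => geti arr p - geti arr j) ++
        (PySem.List.pyRange (p + 1) (arr.length : Int) 1).flatMap (fun i =>
          (PySem.List.pyRange (i + 1) (arr.length : Int) 1).map
            (fun j => geti arr i - geti arr j)),
        |b| ≤ |geti arr p - geti arr q| := by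
      intro b hb
      rw [habs_m]
      rcases List.mem_append.mp hb with hb | hb
      · obtain ⟨j, hj, rfl⟩ := List.mem_map.mp hb
        rw [PySem.List.mem_pyRange_one] at hj
        exact hball p j (by omega) (by omega) (by omega)
      · obtain ⟨i, hi', hmem⟩ := List.mem_flatMap.mp hb
        rw [PySem.List.mem_pyRange_one] at hi'
        obtain ⟨j, hj, rfl⟩ := List.mem_map.mp hmem
        rw [PySem.List.mem_pyRange_one] at hj
        exact hball i j (by omega) (by omega) (by omega)
    by_cases h01 : p = 0 ∧ q = 1
    · obtain ⟨hpe, hqe⟩ := h01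
      rw [hpe, hqe] at hb_bs ⊢
      rw [PySem.List.pyRange_one_eq_nil (le_refl (0 : Int)),
          PySem.List.pyRange_one_eq_nil (show (1 : Int) ≤ 0 + 1 by omega)]
      simp only [List.flatMap_nil, List.map_nil, List.nil_append]
      rw [sel_cons, if_neg (lt_irrefl _)]
      exact sel_eq_self _ _ hb_bs
    · have ha_as : ∀ a ∈ (PySem.List.pyRange 0 p 1).flatMap (fun i =>
            (PySem.List.pyRange (i + 1) (arr.length : Int) 1).map
              (fun j => geti arr i - geti arr j)) ++
          (PySem.List.pyRange (p + 1) q 1).map (fun j => geti arr p - geti arr j),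
          |a| < |geti arr p - geti arr q| := by
        intro a ha
        rw [habs_m]
        rcases List.mem_append.mp ha with ha | ha
        · obtain ⟨i, hi', hmem⟩ := List.mem_flatMap.mp ha
          rw [PySem.List.mem_pyRange_one] at hi'
          obtain ⟨j, hj, rfl⟩ := List.mem_map.mp hmem
          rw [PySem.List.mem_pyRange_one] at hj
          exact pair_lt_of_lex_lt arr lo ilo hi ihi i j hmin' hmax' hlh (by omega) (by omega)
            (by omega) (Or.inl (by omega))
        · obtain ⟨j, hj, rfl⟩ := List.mem_map.mp ha
          rw [PySem.List.mem_pyRange_one] at hj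
          exact pair_lt_of_lex_lt arr lo ilo hi ihi p j hmin' hmax' hlh (by omega) (by omega)
            (by omega) (Or.inr ⟨by omega, by omega⟩)
      have hd0 : |geti arr 0 - geti arr 1| < |geti arr p - geti arr q| := by
        rw [habs_m]
        exact pair_lt_of_lex_lt arr lo ilo hi ihi 0 1 hmin' hmax' hlh (le_refl 0) (by omega)
          h2' (by omega)
      exact sel_first _ _ _ _ hd0 ha_as hb_bs

-- ===== VERDICT (by name: the statement is the Claim_ definition above) =====
theorem biggest_difference_spec : Claim_equal_biggest_difference := by
  intro arr _ hpre
  unfold Spec_biggest_difference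
  obtain ⟨lo, ilo, hi, ihi, hmin, hmax, hB⟩ := biggest_difference_alt_eq arr hpre
  rw [hB, biggest_difference_eq_sel, sel_pairVals arr lo ilo hi ihi hmin hmax hpre]
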